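-- pv_equiv track=rewrite | github.com/sergekamanzi/DSA-HW02-Sparse-Matrix | code/src/sparse_matrix.py | extract_numbers_from_line
-- ===== SOURCE A (Python) =====
-- def extract_numbers_from_line(line):
--     numbers = []
--     num = ''
--     for char in line:
--         if char.isdigit() or char == '-':
--             num += char
--         else:
--             if num:
--                 numbers.append(num)
--                 num = ''
--     if num:
--         numbers.append(num)
--     return numbers
-- ===== SOURCE B (Python) =====
-- import re
--
-- def extract_numbers_from_line(line):
--     return re.findall(r'[0-9-]+', line)
-- ===== Notes on version B (the rewrite author's own statement) =====
-- stated objective: idiomatic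
-- what changed: The manual character-by-character accumulator loop is replaced by a single regex findall of maximal runs of [0-9-].
import Mathlib
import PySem

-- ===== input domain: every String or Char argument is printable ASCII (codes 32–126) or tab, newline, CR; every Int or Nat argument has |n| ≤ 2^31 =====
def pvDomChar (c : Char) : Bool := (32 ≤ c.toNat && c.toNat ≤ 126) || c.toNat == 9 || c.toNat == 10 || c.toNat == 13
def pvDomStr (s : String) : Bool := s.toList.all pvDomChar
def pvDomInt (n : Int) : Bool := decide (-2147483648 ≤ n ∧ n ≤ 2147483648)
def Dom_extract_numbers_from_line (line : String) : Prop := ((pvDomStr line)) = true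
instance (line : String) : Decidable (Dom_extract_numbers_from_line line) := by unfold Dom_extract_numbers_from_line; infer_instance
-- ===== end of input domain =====

-- B replaces A's manual accumulator loop by a regex findall of maximal [0-9-]+ runs (idiomatic; same cost).

-- token character: char.isdigit() or char == '-'  (PySem.Chars.isdigit is exact on the ASCII domain)
def pvTok (c : Char) : Bool := PySem.Chars.isdigit c || c == '-'

-- ===== PORT A =====
-- the for-loop carrying (numbers, num), step for step
def goA : List Char → List String → List Char → List String
  | [], numbers, num => if num ≠ [] then numbers ++ [String.mk num] else numbers
  | c :: rest, numbers, num =>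
    if pvTok c then goA rest numbers (num ++ [c])
    else if num ≠ [] then goA rest (numbers ++ [String.mk num]) []
    else goA rest numbers []

def extract_numbers_from_line (line : String) : List String :=
  goA line.toList [] []

-- ===== PORT B =====
-- re.findall(r'[0-9-]+', line): repeatedly skip non-matching chars, emit the maximal matching run
def findTokens (l : List Char) : List String :=
  match l with
  | [] => []
  | c :: rest =>
    if pvTok c then
      String.mk (c :: rest.takeWhile pvTok) :: findTokens (rest.dropWhile pvTok)
    else findTokens rest
termination_by l.length
decreasing_by
  · simpa using Nat.lt_succ_of_le (List.length_dropWhile_le _ _)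
  · simp

def extract_numbers_from_line_alt (line : String) : List String :=
  findTokens line.toList

-- ===== PRECONDITION & SPEC =====
def Spec_extract_numbers_from_line (line : String) (out : List String) : Prop := out = extract_numbers_from_line_alt line
instance (line : String) (out : List String) : Decidable (Spec_extract_numbers_from_line line out) := by unfold Spec_extract_numbers_from_line; infer_instance

-- ===== CLAIM (what is proved, stated in full; the proofs are below) =====
def Claim_equal_extract_numbers_from_line : Prop := ∀ (line : String), Dom_extract_numbers_from_line line → Spec_extract_numbers_from_line line (extract_numbers_from_line line)

-- ===== LEMMAS AND PROOFS =====

-- the numbers accumulator only ever receives appends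
theorem goA_append (l : List Char) : ∀ (ns : List String) (num : List Char),
    goA l ns num = ns ++ goA l [] num := by
  induction l with
  | nil => intro ns num; by_cases h : num = [] <;> simp [goA, h]
  | cons c rest ih =>
    intro ns num
    by_cases hc : pvTok c
    · rw [goA, goA, if_pos hc, if_pos hc, ih ns (num ++ [c]), ih [] (num ++ [c])]
    · by_cases h : num = []
      · rw [goA, goA, if_neg hc, if_neg hc, if_neg (by simp [h]), if_neg (by simp [h]),
          ih ns []]
      · rw [goA, goA, if_neg hc, if_neg hc, if_pos h, if_pos h,
          ih (ns ++ [String.mk num]) [], List.append_assoc, List.nil_append,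
          ih [String.mk num] []]

-- the fold with pending run `num` versus the run-extraction recursion
theorem goA_eq (l : List Char) : ∀ (num : List Char),
    goA l [] num = if num = [] then findTokens l
      else String.mk (num ++ l.takeWhile pvTok) :: findTokens (l.dropWhile pvTok) := by
  induction l with
  | nil => intro num; by_cases h : num = [] <;> simp [goA, findTokens, h]
  | cons c rest ih =>
    intro num
    by_cases hc : pvTok c
    · rw [goA, if_pos hc, ih (num ++ [c]), if_neg (by simp)]
      by_cases h : num = []
      · rw [if_pos h, h, findTokens, if_pos hc]
        simp [List.takeWhile_cons, List.dropWhile_cons, hc]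
      · rw [if_neg h]
        simp [List.takeWhile_cons, List.dropWhile_cons, hc]
    · by_cases h : num = []
      · rw [goA, if_neg hc, if_neg (by simp [h]), ih [], if_pos rfl, if_pos h]
        rw [findTokens, if_neg hc]
      · rw [goA, if_neg hc, if_pos h, goA_append, ih [], if_pos rfl, if_neg h]
        simp [findTokens, hc, List.takeWhile_cons, List.dropWhile_cons]

-- ===== VERDICT (by name: the statement is the Claim_ definition above) =====
theorem extract_numbers_from_line_spec : Claim_equal_extract_numbers_from_line := by
  intro line _
  show _ = _
  simp [extract_numbers_from_line, extract_numbers_from_line_alt, goA_eq]
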